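-- pv_equiv track=rewrite | github.com/Tav-18/AutomarizacionPowerAutomateCloud | analyzer/services/rules.py | _is_schema_path
-- ===== SOURCE A (Python) =====
-- def _is_schema_path(path: str) -> bool:
--     path_low = (path or "").lower()
--
--     schema_tokens = (
--         ".schema.",
--         ".properties.",
--         ".items.",
--         ".required[",
--         ".type",
--         ".title",
--         ".description",
--         "x-ms-",
--     )
--
--     return any(token in path_low for token in schema_tokens)
-- ===== SOURCE B (Python) =====
-- _DOT_TOKENS = (
--     ".schema.",
--     ".properties.",
--     ".items.",
--     ".required[",
--     ".type",
--     ".title",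
--     ".description",
-- )
--
--
-- def _is_schema_path(path: str) -> bool:
--     # Single left-to-right scan with a first-character dispatch: only at a '.'
--     # do we try the seven dot-tokens as prefixes, only at an 'x' the "x-ms-"
--     # marker; every other position is skipped in O(1).
--     s = (path or "").lower()
--     for i, ch in enumerate(s):
--         if ch == ".":
--             for t in _DOT_TOKENS:
--                 if s.startswith(t, i):
--                     return True
--         elif ch == "x":
--             if s.startswith("x-ms-", i):
--                 return True
--     return False
-- ===== Notes on version B (the rewrite author's own statement) =====
-- stated objective: alternative
-- what changed: Replaces the eight independent whole-string substring scans (any(token in s)) by one explicit left-to-right scan that dispatches on the current character ('.' or 'x') and only then tries the matching tokens as prefixes at that position.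
import Mathlib
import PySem

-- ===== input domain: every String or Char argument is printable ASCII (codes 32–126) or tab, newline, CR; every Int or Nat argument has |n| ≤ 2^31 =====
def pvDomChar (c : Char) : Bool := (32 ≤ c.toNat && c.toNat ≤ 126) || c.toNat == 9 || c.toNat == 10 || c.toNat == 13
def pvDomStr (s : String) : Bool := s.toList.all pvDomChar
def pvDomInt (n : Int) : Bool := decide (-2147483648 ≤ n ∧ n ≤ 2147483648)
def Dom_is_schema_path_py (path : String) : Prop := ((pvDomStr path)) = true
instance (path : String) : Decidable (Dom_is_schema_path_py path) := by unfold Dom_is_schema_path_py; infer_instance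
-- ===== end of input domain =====

-- B replaces A's eight whole-string substring scans by one left-to-right scan that
-- dispatches on the current character ('.' or 'x') before trying tokens as prefixes.

-- ===== PORT A =====
-- A: path_low = (path or "").lower(); any(token in path_low for token in tokens)
def pvTokensA : List String :=
  [".schema.", ".properties.", ".items.", ".required[", ".type", ".title", ".description", "x-ms-"]

def is_schema_path_py (path : String) : Bool :=
  let path_low := PySem.Str.lower (if PySem.Str.len path ≠ 0 then path else "")
  pvTokensA.any (fun token => PySem.Str.isIn token path_low)

-- ===== PORT B =====
-- B: one pass over the lowered string; at a '.' try the seven dot-tokens as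
-- prefixes of the remaining suffix, at an 'x' try "x-ms-", else move on.
def pvDotTokens : List (List Char) :=
  [".schema.".toList, ".properties.".toList, ".items.".toList, ".required[".toList,
   ".type".toList, ".title".toList, ".description".toList]

def pvScan : List Char → Bool
  | [] => false
  | c :: rest =>
      (if c = '.' then pvDotTokens.any (fun t => t.isPrefixOf (c :: rest))
       else if c = 'x' then "x-ms-".toList.isPrefixOf (c :: rest)
       else false) || pvScan rest

def is_schema_path_py_alt (path : String) : Bool :=
  pvScan (PySem.Str.lower (if PySem.Str.len path ≠ 0 then path else "")).toList

-- ===== PRECONDITION & SPEC =====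
def Spec_is_schema_path_py (path : String) (out : Bool) : Prop := out = is_schema_path_py_alt path
instance (path : String) (out : Bool) : Decidable (Spec_is_schema_path_py path out) := by unfold Spec_is_schema_path_py; infer_instance

-- ===== CLAIM (what is proved, stated in full; the proofs are below) =====
def Claim_equal_is_schema_path_py : Prop := ∀ (path : String), Dom_is_schema_path_py path → Spec_is_schema_path_py path (is_schema_path_py path)

-- ===== LEMMAS AND PROOFS =====

def pvTokensB : List (List Char) := pvDotTokens ++ ["x-ms-".toList]

-- B's per-position dispatch tries exactly the same prefixes as checking all tokens.
theorem pvStep_eq (c : Char) (rest : List Char) :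
    (if c = '.' then pvDotTokens.any (fun t => t.isPrefixOf (c :: rest))
     else if c = 'x' then "x-ms-".toList.isPrefixOf (c :: rest)
     else false) = pvTokensB.any (fun t => t.isPrefixOf (c :: rest)) := by
  by_cases hd : c = '.'
  · subst hd
    simp [pvTokensB, pvDotTokens, List.isPrefixOf]
  · by_cases hx : c = 'x'
    · subst hx
      simp [pvTokensB, pvDotTokens, List.isPrefixOf]
    · simp [pvTokensB, pvDotTokens, List.isPrefixOf, hd, hx, Ne.symm hd, Ne.symm hx]

-- The scan finds exactly the strings containing some token as an infix.
theorem pvScan_iff (s : List Char) :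
    pvScan s = true ↔ ∃ t ∈ pvTokensB, t <:+: s := by
  induction s with
  | nil =>
      simp only [pvScan, Bool.false_eq_true, false_iff]
      rintro ⟨t, ht, hi⟩
      rw [List.infix_nil] at hi
      subst hi
      revert ht
      decide
  | cons c rest ih =>
      simp only [pvScan, pvStep_eq, Bool.or_eq_true, List.any_eq_true,
        List.isPrefixOf_iff_prefix, ih]
      constructor
      · rintro (⟨t, ht, hp⟩ | ⟨t, ht, hi⟩)
        · exact ⟨t, ht, hp.isInfix⟩
        · exact ⟨t, ht, hi.trans (List.suffix_cons c rest).isInfix⟩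
      · rintro ⟨t, ht, hi⟩
        rcases (List.infix_cons_iff).1 hi with hp | hi'
        · exact Or.inl ⟨t, ht, hp⟩
        · exact Or.inr ⟨t, ht, hi'⟩

theorem pvTokensB_eq : pvTokensB = pvTokensA.map String.toList := by decide

theorem is_schema_path_py_eq (path : String) :
    is_schema_path_py path = is_schema_path_py_alt path := by
  rw [Bool.eq_iff_iff]
  unfold is_schema_path_py is_schema_path_py_alt
  rw [pvScan_iff]
  simp only [List.any_eq_true, pvTokensB_eq, List.mem_map]
  constructor
  · rintro ⟨tok, htok, hin⟩
    rw [PySem.Str.isIn_eq, PySem.Chars.isIn_iff_infix] at hin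
    exact ⟨tok.toList, ⟨tok, htok, rfl⟩, hin⟩
  · rintro ⟨t, ⟨tok, htok, rfl⟩, hinf⟩
    refine ⟨tok, htok, ?_⟩
    rw [PySem.Str.isIn_eq, PySem.Chars.isIn_iff_infix]
    exact hinf

-- ===== VERDICT (by name: the statement is the Claim_ definition above) =====
theorem is_schema_path_py_spec : Claim_equal_is_schema_path_py := by
  intro path _
  unfold Spec_is_schema_path_py
  exact is_schema_path_py_eq path
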